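-- pv_equiv track=rewrite | github.com/ihmeuw/vivarium_research_ciff_sam | nathaniel/scratch2/scratch.py | tabify
-- ===== SOURCE A (Python) =====
-- def tabify(s):
--     subkeys = s.split('.')
--     tabs = ':\n'
--     result = subkeys[0]
--     for key in subkeys[1:]:
--         tabs+='\t'
--         result += tabs+key
--     return result
-- ===== SOURCE B (Python) =====
-- def tabify(s):
--     out = []
--     depth = 0
--     for ch in s:
--         if ch == '.':
--             depth += 1
--             out.append(':\n' + '\t' * depth)
--         else:
--             out.append(ch)
--     return ''.join(out)
-- ===== Notes on version B (the rewrite author's own statement) =====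
-- stated objective: alternative
-- what changed: B never splits the string into parts: it scans the characters once with a depth counter, emitting a colon, a newline and depth tabs in place of each dot and copying every other character, joining the collected chunks at the end, instead of A's split-on-dot followed by a loop threading a growing separator-string accumulator.
import Mathlib
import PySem

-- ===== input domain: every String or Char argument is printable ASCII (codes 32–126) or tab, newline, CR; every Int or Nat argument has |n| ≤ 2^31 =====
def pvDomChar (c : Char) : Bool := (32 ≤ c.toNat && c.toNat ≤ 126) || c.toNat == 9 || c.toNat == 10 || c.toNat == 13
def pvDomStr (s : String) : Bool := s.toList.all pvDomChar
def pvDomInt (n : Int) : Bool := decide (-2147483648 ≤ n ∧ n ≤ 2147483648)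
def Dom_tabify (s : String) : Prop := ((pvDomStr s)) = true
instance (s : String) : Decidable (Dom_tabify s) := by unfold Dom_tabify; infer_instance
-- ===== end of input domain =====

-- B never splits: it makes a single character scan with a depth counter, emitting ':\n' plus
-- depth tabs at each '.' and copying every other character; objective: alternative, same cost.

-- ===== PORT A =====
-- Port of A, working over List Char (PySem.Chars.splitOn is exact for s.split('.') since the
-- separator is nonempty; subkeys[0] via pyGet?, subkeys[1:] via slice).
def tabify (s : String) : String :=
  let subkeys := PySem.Chars.splitOn s.toList ['.']
  let st := (PySem.List.slice subkeys (some 1)).foldl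
      (fun (st : List Char × List Char) key =>
        (st.1 ++ ['\t'], st.2 ++ (st.1 ++ ['\t']) ++ key))
      ([':', '\n'], (PySem.List.pyGet? subkeys 0).getD [])
  String.mk st.2

-- ===== PORT B =====
-- Port of Source B: one pass over the characters, state = (depth, list of emitted chunks),
-- then ''.join(out) at the end.
def tabify_alt (s : String) : String :=
  let st := s.toList.foldl
    (fun (st : Nat × List (List Char)) ch =>
      if ch = '.' then (st.1 + 1, st.2 ++ [[':', '\n'] ++ List.replicate (st.1 + 1) '\t'])
      else (st.1, st.2 ++ [[ch]]))
    (0, [])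
  String.mk (PySem.Chars.join [] st.2)

-- ===== PRECONDITION & SPEC =====
def Spec_tabify (s : String) (out : String) : Prop := out = tabify_alt s
instance (s : String) (out : String) : Decidable (Spec_tabify s out) := by unfold Spec_tabify; infer_instance

-- ===== CLAIM (what is proved, stated in full; the proofs are below) =====
def Claim_equal_tabify : Prop := ∀ (s : String), Dom_tabify s → Spec_tabify s (tabify s)

-- ===== LEMMAS AND PROOFS =====

-- B's reference recursion: scan at depth d.
def pvScan : Nat → List Char → List Char
  | _, [] => []
  | d, c :: cs =>
    if c = '.' then [':', '\n'] ++ List.replicate (d + 1) '\t' ++ pvScan (d + 1) cs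
    else c :: pvScan d cs

-- A's split, as a direct recursion with the `cur` accumulator of splitOn.go.
def pvSplit : List Char → List Char → List (List Char)
  | cur, [] => [cur.reverse]
  | cur, c :: cs => if c = '.' then cur.reverse :: pvSplit [] cs else pvSplit (c :: cur) cs

lemma pvSplit_ne_nil (cur cs : List Char) : pvSplit cur cs ≠ [] := by
  cases cs with
  | nil => simp [pvSplit]
  | cons c cs => by_cases h : c = '.' <;> simp [pvSplit, h] <;> exact pvSplit_ne_nil _ cs

lemma pvGo_eq_pvSplit (cs : List Char) : ∀ (fuel : Nat) (cur : List Char)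
    (acc : List (List Char)), cs.length < fuel →
    PySem.Chars.splitOn.go ['.'] fuel cs cur acc = acc.reverse ++ pvSplit cur cs := by
  induction cs with
  | nil =>
    intro fuel cur acc h
    match fuel with
    | fuel + 1 =>
      rw [PySem.Chars.splitOn.go]
      simp [pvSplit]
      omega
  | cons c cs ih =>
    intro fuel cur acc h
    match fuel with
    | fuel + 1 =>
      rw [PySem.Chars.splitOn.go]
      by_cases hc : c = '.'
      · have : (['.'].isPrefixOf (c :: cs)) = true := by simp [List.isPrefixOf, hc]
        rw [if_pos this]
        simp only [List.length_singleton, List.drop_succ_cons, List.drop_zero]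
        rw [ih fuel [] (cur.reverse :: acc) (by simpa using h)]
        simp [pvSplit, hc]
      · have : (['.'].isPrefixOf (c :: cs)) = false := by
          simp [List.isPrefixOf]
          exact fun h => hc h.symm
        rw [if_neg (by simp [this])]
        rw [ih fuel (c :: cur) acc (by simpa using h)]
        simp [pvSplit, hc]

lemma pvSplitOn_eq (cs : List Char) : PySem.Chars.splitOn cs ['.'] = pvSplit [] cs := by
  unfold PySem.Chars.splitOn
  rw [pvGo_eq_pvSplit cs (cs.length + 1) [] [] (by omega)]
  simp

-- Rendering of a nonempty parts list starting at tab depth d.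
def pvLines : Nat → List (List Char) → List Char
  | _, [] => []
  | d, p :: rest =>
    List.replicate d '\t' ++ p ++
      (if rest = [] then [] else [':', '\n'] ++ pvLines (d + 1) rest)

-- A's loop, characterized: suffix contributed after the head.
def pvSuffix : Nat → List (List Char) → List Char
  | _, [] => []
  | d, k :: rest => [':', '\n'] ++ List.replicate (d + 1) '\t' ++ k ++ pvSuffix (d + 1) rest

lemma pvA_loop (rest : List (List Char)) : ∀ (d : Nat) (acc : List Char),
    (rest.foldl
      (fun (st : List Char × List Char) key =>
        (st.1 ++ ['\t'], st.2 ++ (st.1 ++ ['\t']) ++ key))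
      ([':', '\n'] ++ List.replicate d '\t', acc)).2 = acc ++ pvSuffix d rest := by
  induction rest with
  | nil => intro d acc; simp [pvSuffix]
  | cons k rest ih =>
    intro d acc
    have h1 : ([':', '\n'] ++ List.replicate d '\t') ++ ['\t']
        = [':', '\n'] ++ List.replicate (d + 1) '\t' := by
      simp [List.replicate_succ' (n := d)]
    simp only [List.foldl_cons, h1, pvSuffix, ih]
    simp

lemma pvHead_suffix (rest : List (List Char)) : ∀ (d : Nat) (p : List Char),
    List.replicate d '\t' ++ p ++ pvSuffix d rest = pvLines d (p :: rest) := by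
  induction rest with
  | nil => intro d p; simp [pvSuffix, pvLines]
  | cons k rest ih =>
    intro d p
    have hstep : pvLines d (p :: k :: rest)
        = List.replicate d '\t' ++ p ++ [':', '\n'] ++ pvLines (d + 1) (k :: rest) := by
      conv_lhs => rw [pvLines]
      simp
    rw [hstep, ← ih (d + 1) k]
    simp [pvSuffix]

-- pvLines over pvSplit collapses to the scan.
lemma pvLines_pvSplit (cs : List Char) : ∀ (d : Nat) (cur : List Char),
    pvLines d (pvSplit cur cs) = List.replicate d '\t' ++ cur.reverse ++ pvScan d cs := by
  induction cs with
  | nil => intro d cur; simp [pvSplit, pvLines, pvScan]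
  | cons c cs ih =>
    intro d cur
    by_cases hc : c = '.'
    · have hne : pvSplit [] cs ≠ [] := pvSplit_ne_nil [] cs
      simp only [pvSplit, if_pos hc]
      have hstep : pvLines d (cur.reverse :: pvSplit [] cs)
          = List.replicate d '\t' ++ cur.reverse ++ [':', '\n'] ++ pvLines (d + 1) (pvSplit [] cs) := by
        conv_lhs => rw [pvLines]
        simp [hne]
      rw [hstep, ih (d + 1) []]
      simp [pvScan, hc]
    · simp only [pvSplit, if_neg hc]
      rw [ih d (c :: cur)]
      simp [pvScan, hc]

-- ''.join = flatten.
lemma pvJoin_nil (ps : List (List Char)) : PySem.Chars.join [] ps = ps.flatten := by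
  match ps with
  | [] => simp [PySem.Chars.join_nil]
  | [p] => simp [PySem.Chars.join_singleton]
  | p :: q :: r =>
    rw [PySem.Chars.join_cons_cons, pvJoin_nil (q :: r)]
    simp

-- B's fold accumulates chunks whose flatten is the scan.
lemma pvB_loop (cs : List Char) : ∀ (d : Nat) (out : List (List Char)),
    (cs.foldl
      (fun (st : Nat × List (List Char)) ch =>
        if ch = '.' then (st.1 + 1, st.2 ++ [[':', '\n'] ++ List.replicate (st.1 + 1) '\t'])
        else (st.1, st.2 ++ [[ch]]))
      (d, out)).2.flatten = out.flatten ++ pvScan d cs := by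
  induction cs with
  | nil => intro d out; simp [pvScan]
  | cons c cs ih =>
    intro d out
    by_cases hc : c = '.'
    · simp only [List.foldl_cons, if_pos hc, ih]
      simp [pvScan, hc]
    · simp only [List.foldl_cons, if_neg hc, ih]
      simp [pvScan, hc]

-- A's whole body equals the scan.
lemma pvA_eq_scan (cs : List Char) :
    ((PySem.List.slice (PySem.Chars.splitOn cs ['.']) (some 1)).foldl
      (fun (st : List Char × List Char) key =>
        (st.1 ++ ['\t'], st.2 ++ (st.1 ++ ['\t']) ++ key))
      ([':', '\n'], (PySem.List.pyGet? (PySem.Chars.splitOn cs ['.']) 0).getD [])).2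
    = pvScan 0 cs := by
  rw [pvSplitOn_eq]
  obtain ⟨p, rest, hpr⟩ := List.exists_cons_of_ne_nil (pvSplit_ne_nil [] cs)
  rw [hpr, PySem.List.slice_from_one]
  have h0 : (PySem.List.pyGet? (p :: rest) 0).getD [] = p := by
    simp [PySem.List.pyGet?, PySem.List.pyIdx?]
  have hA := pvA_loop rest 0 p
  simp only [List.replicate_zero, List.append_nil] at hA
  simp only [List.tail_cons, h0, hA]
  have := pvHead_suffix rest 0 p
  simp only [List.replicate_zero, List.nil_append] at this
  rw [this, ← hpr, pvLines_pvSplit cs 0 []]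
  simp

-- ===== VERDICT (by name: the statement is the Claim_ definition above) =====
theorem tabify_spec : Claim_equal_tabify := by
  intro s _
  unfold Spec_tabify tabify tabify_alt
  simp only [pvA_eq_scan, pvJoin_nil, pvB_loop s.toList 0 []]
  simp
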